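-- pv_equiv track=rewrite | github.com/Joaquin-Pozo/Ejercicios-algoritmos | sesion 1/elementosPares.py | elementosPares
-- ===== SOURCE A (Python) =====
-- def verificaDuplicados(array, elemento) -> bool:
--     for i in range(len(array)):
--         if elemento == array[i]:
--             return False
--     return True
--
-- def elementosPares(array) -> list:
--     arrayElementosPares = []
--     for i in range(len(array)):
--         elemento = array[i]
--         cantidadRepetidas = array.count(elemento)
--         if (cantidadRepetidas % 2) == 0:
--             if verificaDuplicados(arrayElementosPares, elemento):
--                 arrayElementosPares.append(elemento)
--     return arrayElementosPares
-- ===== SOURCE B (Python) =====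
-- def elementosPares(array) -> list:
--     counts = {}
--     for x in array:
--         counts[x] = counts.get(x, 0) + 1
--     return [e for e, c in counts.items() if c % 2 == 0]
-- ===== Notes on version B (the rewrite author's own statement) =====
-- stated objective: faster
-- what changed: Replaces the quadratic scan (per-element array.count plus a linear dedup scan of the result) with a single-pass frequency dict whose distinct keys, walked in first-occurrence order, yield the even-count elements directly.
import Mathlib
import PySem

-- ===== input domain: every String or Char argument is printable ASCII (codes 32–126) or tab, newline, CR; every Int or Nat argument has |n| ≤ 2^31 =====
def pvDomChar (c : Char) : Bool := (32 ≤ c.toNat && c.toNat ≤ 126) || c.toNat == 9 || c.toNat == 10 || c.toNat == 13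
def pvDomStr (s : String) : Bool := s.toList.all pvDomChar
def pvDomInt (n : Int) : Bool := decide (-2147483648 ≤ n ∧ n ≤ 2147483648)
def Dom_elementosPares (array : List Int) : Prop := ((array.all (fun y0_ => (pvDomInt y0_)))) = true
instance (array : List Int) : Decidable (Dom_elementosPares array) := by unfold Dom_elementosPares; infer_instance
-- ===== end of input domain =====

-- B replaces A's quadratic per-element array.count + result-membership dedup with a
-- single-pass frequency dict walked over its distinct keys (objective: faster).

-- ===== PORT A =====
-- for i in range(len(array)): if elemento == array[i]: return False / return True
def verificaDuplicadosLoop (array : List Int) (elemento : Int) : List Int → Bool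
  | [] => true
  | i :: rest =>
    if elemento == PySem.List.pyGetD array i 0 then false
    else verificaDuplicadosLoop array elemento rest

def verificaDuplicados (array : List Int) (elemento : Int) : Bool :=
  verificaDuplicadosLoop array elemento (PySem.List.pyRange 0 (PySem.List.len array))

def elementosParesLoop (array : List Int) : List Int → List Int → List Int
  | acc, [] => acc
  | acc, i :: rest =>
    let elemento := PySem.List.pyGetD array i 0
    let cantidadRepetidas : Int := PySem.List.count array elemento
    let acc' := if PySem.Int.mod cantidadRepetidas 2 == 0 then
                  (if verificaDuplicados acc elemento then acc ++ [elemento] else acc)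
                else acc
    elementosParesLoop array acc' rest

def elementosPares (array : List Int) : List Int :=
  elementosParesLoop array [] (PySem.List.pyRange 0 (PySem.List.len array))

-- ===== PORT B =====
def elementosPares_alt (array : List Int) : List Int :=
  let counts := array.foldl (fun d x => d.insert x (d.getD x 0 + 1)) (PySem.Dict.empty : PySem.Dict Int Int)
  (counts.items.filter (fun p => PySem.Int.mod p.2 2 == 0)).map Prod.fst

-- ===== PRECONDITION & SPEC =====
def Spec_elementosPares (array : List Int) (out : List Int) : Prop := out = elementosPares_alt array
instance (array : List Int) (out : List Int) : Decidable (Spec_elementosPares array out) := by unfold Spec_elementosPares; infer_instance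

-- ===== CLAIM (what is proved, stated in full; the proofs are below) =====
def Claim_equal_elementosPares : Prop := ∀ (array : List Int), Dom_elementosPares array → Spec_elementosPares array (elementosPares array)

-- ===== LEMMAS AND PROOFS =====

-- the inner scan of the result list is a membership test
theorem verifLoop_eq_not_any (acc : List Int) (el : Int) (idxs : List Int) :
    verificaDuplicadosLoop acc el idxs = !(idxs.any (fun i => el == PySem.List.pyGetD acc i 0)) := by
  induction idxs with
  | nil => rfl
  | cons i rest ih =>
    simp only [verificaDuplicadosLoop, List.any_cons]
    cases h : (el == PySem.List.pyGetD acc i 0) <;> simp [ih]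

theorem verif_eq (acc : List Int) (el : Int) :
    verificaDuplicados acc el = !(acc.contains el) := by
  rw [verificaDuplicados, verifLoop_eq_not_any]
  have h : (PySem.List.pyRange 0 (PySem.List.len acc)).any
      (fun i => el == PySem.List.pyGetD acc i 0) = acc.any (fun y => el == y) := by
    conv_rhs => rw [← PySem.List.map_pyGetD_pyRange_zero acc 0]
    rw [List.any_map]
    rfl
  rw [h, List.any_beq]

-- one step of A's loop, with the two nested ifs fused (see loop_eq_foldl)
def stepP (pb : Int → Bool) (acc : List Int) (x : Int) : List Int :=
  if pb x && !(acc.contains x) then acc ++ [x] else acc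

theorem loop_eq_foldl (array : List Int) (idxs acc : List Int) :
    elementosParesLoop array acc idxs =
      (idxs.map (fun i => PySem.List.pyGetD array i 0)).foldl
        (stepP (fun x => PySem.Int.mod (PySem.List.count array x : Int) 2 == 0)) acc := by
  induction idxs generalizing acc with
  | nil => rfl
  | cons i rest ih =>
    simp only [elementosParesLoop, List.map_cons, List.foldl_cons, ih]
    congr 1
    rw [verif_eq, stepP]
    cases hp : (PySem.Int.mod (PySem.List.count array (PySem.List.pyGetD array i 0) : Int) 2 == 0) <;>
      cases hc : ((acc.contains (PySem.List.pyGetD array i 0) : Bool)) <;> simp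

-- the dedup-append loop over l starting from s collects the new elements of l (first
-- occurrences, in order) that satisfy pb
theorem foldl_stepP (pb : Int → Bool) (l s : List Int) :
    l.foldl (stepP pb) s =
      s ++ ((PySem.Set.ofList l : List Int).filter (fun x => pb x && !(s.contains x))) := by
  induction l using List.reverseRecOn generalizing s with
  | nil => simp [PySem.Set.ofList]
  | append_singleton l x ih =>
    rw [List.foldl_append, List.foldl_cons, List.foldl_nil, ih, stepP,
      PySem.Set.ofList_append_singleton]
    by_cases hx : x ∈ l
    · rw [PySem.Set.add_of_mem ((PySem.Set.mem_ofList _ _).mpr hx)]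
      cases hp : pb x
      · simp [hp]
      · by_cases hs : x ∈ s
        · simp [hs]
        · have hmem : x ∈ (PySem.Set.ofList l : List Int).filter (fun y => pb y && !(s.contains y)) := by
            simp [List.mem_filter, PySem.Set.mem_ofList, hx, hp, hs]
          simp [hp, hs, hx]
    · rw [PySem.Set.add_of_not_mem (fun h => hx ((PySem.Set.mem_ofList _ _).mp h)),
        List.filter_append, List.append_assoc]
      have hnm : x ∉ (PySem.Set.ofList l : List Int).filter (fun y => pb y && !(s.contains y)) := by
        intro h
        exact hx ((PySem.Set.mem_ofList _ _).mp (List.mem_of_mem_filter h))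
      cases hp : pb x
      · simp [hp]
      · by_cases hs : x ∈ s
        · simp [hp, hs]
        · simp [hp, hs, hx]

theorem elementosPares_eq_filter (array : List Int) :
    elementosPares array = (PySem.Set.ofList array : List Int).filter
      (fun x => PySem.Int.mod (PySem.List.count array x : Int) 2 == 0) := by
  rw [elementosPares, loop_eq_foldl, PySem.List.map_pyGetD_pyRange_zero, foldl_stepP]
  simp

theorem alt_eq_filter (array : List Int) :
    elementosPares_alt array = (PySem.Set.ofList array : List Int).filter
      (fun x => PySem.Int.mod (PySem.List.count array x : Int) 2 == 0) := by
  rw [elementosPares_alt]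
  simp only [PySem.Dict.foldl_insert_getD_add_one_eq_counter, PySem.Dict.items_counter]
  rw [List.filter_map, List.map_map]
  simp [Function.comp_def, PySem.List.count_eq]

-- ===== VERDICT (by name: the statement is the Claim_ definition above) =====
theorem elementosPares_spec : Claim_equal_elementosPares := by
  intro array _
  unfold Spec_elementosPares
  rw [elementosPares_eq_filter, alt_eq_filter]
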